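-- pv_equiv track=rewrite | github.com/lmschw/vicsek-simulator | main/ServiceAnalysis.py | findParticleWithMaxSwitches
-- ===== SOURCE A (Python) =====
-- def findParticlesSwitchingValues(n, switchValues, startTime=0, endTime=None):
--     """
--     Finds the indices of particles that switch values and the timesteps at which they switch.
--
--     Params:
--         - n (int): the total number of particles
--         - switchValues (array of switchTypeValues): the switch type value of every particle at every timestep
--         - startTime (int) [optional]: the first timestep to be included
--         - endTime (int) [optional]: the last timestep to be included
--
--     Returns:
--         A dictionary containing the indices of particles as keys and a tuple of timesteps and the new corresponding value as its value.
--     """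
--     if endTime == None:
--         endTime = len(switchValues)
--     switchers = {}
--     for i in range(n):
--         val = switchValues[0][i]
--         for timestep in range(startTime, endTime):
--             newVal = switchValues[timestep][i]
--             if val != newVal:
--                 if i in switchers.keys():
--                     switchers.get(i).append((timestep, newVal))
--                 else:
--                     switchers[i] = [(timestep, newVal)]
--                 val = newVal
--     return switchers
--
-- def findParticleWithMaxSwitches(n, switchValues, startTime=0, endTime=None):
--     """
--     Determines the index of the particle that has performed the highest number of switchTypeValue switches within the provided timeframe.
--
--     Params:
--         - n (int): the total number of particles
--         - switchValues (array of switchTypeValues): the switch type value of every particle at every timestep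
--         - startTime (int) [optional]: the first timestep to be included
--         - endTime (int) [optional]: the last timestep to be included
--
--     Returns:
--         Integer representing the index of the particle with the highest number of switchTypeValue switches
--         as well as the number of switches performed by that particle.
--     """
--     switchers = findParticlesSwitchingValues(n, switchValues, startTime, endTime)
--     maxSwitches = 0
--     maxSwitchesIdx = 0
--     for key, val in switchers.items():
--         if len(val) > maxSwitches:
--             maxSwitches = len(val)
--             maxSwitchesIdx = key
--     return maxSwitchesIdx, maxSwitches
-- ===== SOURCE B (Python) =====
-- def findParticleWithMaxSwitches(n, switchValues, startTime=0, endTime=None):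
--     """Row-major re-implementation: sweep the timesteps once, updating every
--     particle's (current value, switch count) pair in parallel from each row,
--     then take the maximum count and its first index (or (0, 0) if nothing
--     switched)."""
--     if n <= 0:
--         return 0, 0
--     if endTime is None:
--         endTime = len(switchValues)
--     state = [(switchValues[0][i], 0) for i in range(n)]
--     for t in range(startTime, endTime):
--         row = switchValues[t]
--         state = [((row[i], c + 1) if row[i] != v else (v, c))
--                  for i, (v, c) in enumerate(state)]
--     counts = [c for _, c in state]
--     best = max(counts)
--     return (counts.index(best) if best > 0 else 0, best)
-- ===== Notes on version B (the rewrite author's own statement) =====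
-- stated objective: alternative
-- what changed: B transposes the traversal: instead of A's per-particle column scan that accumulates a dict of per-particle switch-event lists and then scans the dict for the longest list, B sweeps the timesteps row by row, updating all particles' (current value, switch count) pairs in parallel, and finishes with max over the counts plus first-index lookup for the winner.
import Mathlib
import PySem

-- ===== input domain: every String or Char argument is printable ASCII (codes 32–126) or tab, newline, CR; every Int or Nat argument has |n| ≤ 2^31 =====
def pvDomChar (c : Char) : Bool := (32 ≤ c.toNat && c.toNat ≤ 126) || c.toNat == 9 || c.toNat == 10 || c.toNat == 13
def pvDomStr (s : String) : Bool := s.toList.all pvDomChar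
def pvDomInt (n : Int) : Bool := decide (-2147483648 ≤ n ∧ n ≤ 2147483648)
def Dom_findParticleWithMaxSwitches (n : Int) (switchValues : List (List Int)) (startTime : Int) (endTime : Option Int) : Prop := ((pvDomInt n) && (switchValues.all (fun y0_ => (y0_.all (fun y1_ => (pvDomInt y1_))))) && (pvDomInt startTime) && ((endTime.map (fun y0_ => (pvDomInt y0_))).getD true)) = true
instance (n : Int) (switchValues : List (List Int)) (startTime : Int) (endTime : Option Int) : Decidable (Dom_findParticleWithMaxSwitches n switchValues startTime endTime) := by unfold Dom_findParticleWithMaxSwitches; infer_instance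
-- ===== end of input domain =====

-- B transposes the loops: it sweeps the timesteps row by row updating all particles'
-- (value, count) pairs in parallel, then takes max + first index, instead of A's
-- per-particle column scans into a dict of switch-event lists (objective: alternative).

-- ===== PORT A =====
-- inner loop body of findParticlesSwitchingValues: state = (val, switchers)
def innerStepA (svs : List (List Int)) (i : Int)
    (st : Int × PySem.Dict Int (List (Int × Int))) (t : Int) :
    Int × PySem.Dict Int (List (Int × Int)) :=
  let newVal := ((PySem.List.pyGet? ((PySem.List.pyGet? svs t).getD []) i).getD 0)
  if st.1 ≠ newVal then
    (newVal,
      if st.2.contains i then st.2.modify i [] (· ++ [(t, newVal)])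
      else st.2.insert i [(t, newVal)])
  else st

def findParticlesSwitchingValues (n : Int) (svs : List (List Int)) (startTime : Int)
    (endTime : Option Int) : PySem.Dict Int (List (Int × Int)) :=
  let e := endTime.getD (svs.length : Int)
  (PySem.List.pyRange 0 n 1).foldl
    (fun d i =>
      ((PySem.List.pyRange startTime e 1).foldl (innerStepA svs i)
        (((PySem.List.pyGet? ((PySem.List.pyGet? svs 0).getD []) i).getD 0), d)).2)
    PySem.Dict.empty

def findParticleWithMaxSwitches (n : Int) (switchValues : List (List Int)) (startTime : Int) (endTime : Option Int) : Int × Int :=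
  let switchers := findParticlesSwitchingValues n switchValues startTime endTime
  switchers.items.foldl
    (fun acc kv => if (kv.2.length : Int) > acc.2 then (kv.1, (kv.2.length : Int)) else acc)
    (0, 0)

-- ===== PORT B =====
-- one timestep of B: update every particle's (value, count) pair from the row
def rowUpd (row : List Int) (st : List (Int × Int)) : List (Int × Int) :=
  (PySem.List.enumerate st).map (fun p =>
    let x := (PySem.List.pyGet? row p.1).getD 0
    if x ≠ p.2.1 then (x, p.2.2 + 1) else p.2)

def findParticleWithMaxSwitches_alt (n : Int) (switchValues : List (List Int)) (startTime : Int) (endTime : Option Int) : Int × Int :=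
  if n ≤ 0 then (0, 0) else
  let e := endTime.getD (switchValues.length : Int)
  let state0 := (PySem.List.pyRange 0 n 1).map
    (fun i => (((PySem.List.pyGet? ((PySem.List.pyGet? switchValues 0).getD []) i).getD 0), (0 : Int)))
  let state := (PySem.List.pyRange startTime e 1).foldl
    (fun st t => rowUpd ((PySem.List.pyGet? switchValues t).getD []) st) state0
  let counts := state.map Prod.snd
  -- counts is nonempty here (n > 0), so maxD's default is never used (Python: max(counts))
  let best := PySem.List.maxD counts (fun x => x) 0
  (if best > 0 then ((PySem.List.index? counts best).getD 0 : Int) else 0, best)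

-- ===== PRECONDITION & SPEC =====
-- true iff the optional row exists and has length ≥ n (all indices 0..n-1 are valid)
def pvRowOK (n : Int) (o : Option (List Int)) : Bool :=
  match o with
  | some r => decide (n ≤ (r.length : Int))
  | none => false

-- Pre_ excludes exactly the inputs where Python A raises an IndexError: with n > 0,
-- some accessed row switchValues[0] / switchValues[t] is missing or shorter than n.
def Pre_findParticleWithMaxSwitches (n : Int) (switchValues : List (List Int)) (startTime : Int) (endTime : Option Int) : Prop :=
  n ≤ 0 ∨
    (pvRowOK n (PySem.List.pyGet? switchValues 0) = true ∧
      ∀ t ∈ PySem.List.pyRange startTime (endTime.getD (switchValues.length : Int)) 1,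
        pvRowOK n (PySem.List.pyGet? switchValues t) = true)

instance (n : Int) (switchValues : List (List Int)) (startTime : Int) (endTime : Option Int) : Decidable (Pre_findParticleWithMaxSwitches n switchValues startTime endTime) := by
  unfold Pre_findParticleWithMaxSwitches; infer_instance

def pvWitness_findParticleWithMaxSwitches : Int × List (List Int) × Int × Option Int :=
  (2, [[0, 1], [1, 1], [1, 0]], 0, none)

def Spec_findParticleWithMaxSwitches (n : Int) (switchValues : List (List Int)) (startTime : Int) (endTime : Option Int) (out : Int × Int) : Prop := out = findParticleWithMaxSwitches_alt n switchValues startTime endTime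
instance (n : Int) (switchValues : List (List Int)) (startTime : Int) (endTime : Option Int) (out : Int × Int) : Decidable (Spec_findParticleWithMaxSwitches n switchValues startTime endTime out) := by unfold Spec_findParticleWithMaxSwitches; infer_instance

-- ===== CLAIM (what is proved, stated in full; the proofs are below) =====
def Claim_equal_findParticleWithMaxSwitches : Prop := ∀ (n : Int) (switchValues : List (List Int)) (startTime : Int) (endTime : Option Int), Dom_findParticleWithMaxSwitches n switchValues startTime endTime → Pre_findParticleWithMaxSwitches n switchValues startTime endTime → Spec_findParticleWithMaxSwitches n switchValues startTime endTime (findParticleWithMaxSwitches n switchValues startTime endTime)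

-- ===== LEMMAS AND PROOFS =====

-- reference inner loop for the proofs: state = (val, list of switch events so far)
def pvEvStep (svs : List (List Int)) (i : Int) (st : Int × List (Int × Int)) (t : Int) :
    Int × List (Int × Int) :=
  let x := ((PySem.List.pyGet? ((PySem.List.pyGet? svs t).getD []) i).getD 0)
  if st.1 ≠ x then (x, st.2 ++ [(t, x)]) else st

-- the switch events of particle i over the timeframe
def pvE (svs : List (List Int)) (startTime e i : Int) : List (Int × Int) :=
  ((PySem.List.pyRange startTime e 1).foldl (pvEvStep svs i)
    (((PySem.List.pyGet? ((PySem.List.pyGet? svs 0).getD []) i).getD 0), [])).2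

-- one particle's (value, count) step, as it appears after the loop interchange
def pvCntStep (svs : List (List Int)) (i : Int) (st : Int × Int) (t : Int) : Int × Int :=
  let x := ((PySem.List.pyGet? ((PySem.List.pyGet? svs t).getD []) i).getD 0)
  if x ≠ st.1 then (x, st.2 + 1) else st

-- the dict as particle i's inner loop sees it: base dict plus i's pending events (if any)
def pvDictOf (d : PySem.Dict Int (List (Int × Int))) (i : Int) (evs : List (Int × Int)) :
    PySem.Dict Int (List (Int × Int)) :=
  if evs.isEmpty then d else d.insert i evs

theorem pv_stepA_dictOf (svs : List (List Int)) (i t v : Int) (evs : List (Int × Int))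
    (d : PySem.Dict Int (List (Int × Int))) (hd : d.contains i = false) :
    innerStepA svs i (v, pvDictOf d i evs) t =
      ((pvEvStep svs i (v, evs) t).1, pvDictOf d i (pvEvStep svs i (v, evs) t).2) := by
  unfold innerStepA pvEvStep
  set x := ((PySem.List.pyGet? ((PySem.List.pyGet? svs t).getD []) i).getD 0) with hx
  by_cases h : v = x
  · simp [pvDictOf, h]
  · cases evs with
    | nil => simp [pvDictOf, hd, h]
    | cons e es =>
      have hne : (e :: es).isEmpty = false := rfl
      simp only [pvDictOf, hne, Bool.false_eq_true, if_neg, h, ne_eq, not_false_iff, if_pos]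
      have hc : ((d.insert i (e :: es)).contains i) = true := PySem.Dict.contains_insert_self d i (e :: es)
      simp only [hc, if_pos]
      have hmod : (d.insert i (e :: es)).modify i [] (· ++ [(t, x)])
          = (d.insert i (e :: es)).insert i ((d.insert i (e :: es)).getD i [] ++ [(t, x)]) := rfl
      rw [hmod, PySem.Dict.getD_insert_self, PySem.Dict.insert_insert_self]
      simp

theorem pv_innerA_eq (svs : List (List Int)) (i : Int)
    (d : PySem.Dict Int (List (Int × Int))) (hd : d.contains i = false) :
    ∀ (ts : List Int) (v : Int) (evs : List (Int × Int)),
      ts.foldl (innerStepA svs i) (v, pvDictOf d i evs) =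
        ((ts.foldl (pvEvStep svs i) (v, evs)).1,
          pvDictOf d i (ts.foldl (pvEvStep svs i) (v, evs)).2) := by
  intro ts
  induction ts with
  | nil => intro v evs; rfl
  | cons t ts ih =>
    intro v evs
    simp only [List.foldl_cons]
    rw [pv_stepA_dictOf svs i t v evs d hd]
    exact ih (pvEvStep svs i (v, evs) t).1 (pvEvStep svs i (v, evs) t).2

theorem pv_innerB_eq (svs : List (List Int)) (i : Int) :
    ∀ (ts : List Int) (v : Int) (evs : List (Int × Int)),
      ts.foldl (pvCntStep svs i) (v, (evs.length : Int)) =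
        ((ts.foldl (pvEvStep svs i) (v, evs)).1,
          ((ts.foldl (pvEvStep svs i) (v, evs)).2.length : Int)) := by
  intro ts
  induction ts with
  | nil => intro v evs; rfl
  | cons t ts ih =>
    intro v evs
    simp only [List.foldl_cons]
    by_cases h : v = ((PySem.List.pyGet? ((PySem.List.pyGet? svs t).getD []) i).getD 0)
    · have h1 : pvCntStep svs i (v, (evs.length : Int)) t = (v, (evs.length : Int)) := by
        simp [pvCntStep, h]
      have h2 : pvEvStep svs i (v, evs) t = (v, evs) := by
        simp [pvEvStep, h]
      rw [h1, h2]; exact ih v evs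
    · set x := ((PySem.List.pyGet? ((PySem.List.pyGet? svs t).getD []) i).getD 0) with hx
      have h1 : pvCntStep svs i (v, (evs.length : Int)) t = (x, ((evs ++ [(t, x)]).length : Int)) := by
        show (if x ≠ v then (x, (evs.length : Int) + 1) else (v, (evs.length : Int))) = _
        rw [if_pos (fun hh => h hh.symm)]
        simp
      have h2 : pvEvStep svs i (v, evs) t = (x, evs ++ [(t, x)]) := by
        show (if v ≠ x then (x, evs ++ [(t, x)]) else (v, evs)) = _
        rw [if_pos h]
      rw [h1, h2]; exact ih x (evs ++ [(t, x)])

theorem pv_outerA (svs : List (List Int)) (startTime e : Int) :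
    ∀ (is : List Int) (L : List (Int × List (Int × Int))),
      is.Nodup → (∀ j ∈ is, (PySem.Dict.mk L).contains j = false) →
      is.foldl
        (fun d i =>
          ((PySem.List.pyRange startTime e 1).foldl (innerStepA svs i)
            (((PySem.List.pyGet? ((PySem.List.pyGet? svs 0).getD []) i).getD 0), d)).2)
        (PySem.Dict.mk L)
      = PySem.Dict.mk (L ++ (is.filter (fun j => !(pvE svs startTime e j).isEmpty)).map
          (fun j => (j, pvE svs startTime e j))) := by
  intro is
  induction is with
  | nil => intro L _ _; simp
  | cons i is ih =>
    intro L hnd hcon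
    have hdi : (PySem.Dict.mk L).contains i = false := hcon i (by simp)
    simp only [List.foldl_cons]
    have h0 : (PySem.Dict.mk L) = pvDictOf (PySem.Dict.mk L) i [] := rfl
    rw [h0, pv_innerA_eq svs i (PySem.Dict.mk L) hdi]
    by_cases he : (pvE svs startTime e i).isEmpty
    · have hd' : pvDictOf (PySem.Dict.mk L) i (pvE svs startTime e i) = PySem.Dict.mk L := by
        simp [pvDictOf, he]
      rw [show ((PySem.List.pyRange startTime e 1).foldl (pvEvStep svs i)
            (((PySem.List.pyGet? ((PySem.List.pyGet? svs 0).getD []) i).getD 0), [])).2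
          = pvE svs startTime e i from rfl, hd']
      rw [ih L hnd.of_cons (fun j hj => hcon j (List.mem_cons_of_mem _ hj))]
      simp [he]
    · have hins : pvDictOf (PySem.Dict.mk L) i (pvE svs startTime e i)
          = PySem.Dict.mk (L ++ [(i, pvE svs startTime e i)]) := by
        simp only [pvDictOf, he, Bool.false_eq_true, ite_false]
        show PySem.Dict.insert _ _ _ = _
        unfold PySem.Dict.insert
        rw [if_neg]
        simp [hdi]
      rw [show ((PySem.List.pyRange startTime e 1).foldl (pvEvStep svs i)
            (((PySem.List.pyGet? ((PySem.List.pyGet? svs 0).getD []) i).getD 0), [])).2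
          = pvE svs startTime e i from rfl, hins]
      have hcon' : ∀ j ∈ is, (PySem.Dict.mk (L ++ [(i, pvE svs startTime e i)])).contains j = false := by
        intro j hj
        have hji : j ≠ i := by
          intro hh; exact (List.nodup_cons.mp hnd).1 (hh ▸ hj)
        have := hcon j (List.mem_cons_of_mem _ hj)
        simp only [PySem.Dict.contains, List.any_append] at this ⊢
        simp [this]
        exact fun hh => hji hh.symm
      rw [ih (L ++ [(i, pvE svs startTime e i)]) hnd.of_cons hcon']
      simp [he]

theorem pv_scan_eq (svs : List (List Int)) (startTime e : Int) :
    ∀ (is : List Int) (acc : Int × Int), 0 ≤ acc.2 →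
      ((is.filter (fun j => !(pvE svs startTime e j).isEmpty)).map
          (fun j => (j, pvE svs startTime e j))).foldl
        (fun acc kv => if (kv.2.length : Int) > acc.2 then (kv.1, (kv.2.length : Int)) else acc)
        acc
      = is.foldl
          (fun best j =>
            if ((pvE svs startTime e j).length : Int) > best.2
            then (j, ((pvE svs startTime e j).length : Int)) else best)
          acc := by
  intro is
  induction is with
  | nil => intro acc _; rfl
  | cons i is ih =>
    intro acc hacc
    by_cases he : (pvE svs startTime e i).isEmpty
    · have hlen : ((pvE svs startTime e i).length : Int) = 0 := by
        simp [List.isEmpty_iff_length_eq_zero.mp he]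
      rw [List.filter_cons, if_neg (by simp [he]), List.foldl_cons,
        if_neg (by rw [hlen]; exact lt_irrefl _ ∘ lt_of_le_of_lt hacc)]
      exact ih acc hacc
    · rw [List.filter_cons, if_pos (by simp [he]), List.map_cons, List.foldl_cons, List.foldl_cons]
      by_cases hgt : ((pvE svs startTime e i).length : Int) > acc.2
      · rw [if_pos hgt]
        exact ih _ (by positivity)
      · rw [if_neg hgt]
        exact ih acc hacc

theorem pv_pyRange_nodup (a b : Int) : (PySem.List.pyRange a b 1).Nodup := by
  unfold PySem.List.pyRange
  rw [if_neg one_ne_zero]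
  exact List.nodup_range.map (fun x y h => by omega)

-- pyRange 0 n 1 as a mapped List.range
theorem pv_pyRange_zero (n : Int) :
    PySem.List.pyRange 0 n 1 = (List.range n.toNat).map (fun (k : Nat) => (k : Int)) := by
  rw [PySem.List.pyRange_one]
  simp only [Int.sub_zero, zero_add]

-- enumerate of a range-comprehension pairs each element with its own index
theorem pv_enum_map_range {α : Type} (m : Nat) (g : Nat → α) :
    PySem.List.enumerate ((List.range m).map g)
      = (List.range m).map (fun (k : Nat) => ((k : Int), g k)) := by
  apply List.ext_getElem?
  intro k
  rw [PySem.List.getElem?_enumerate]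
  by_cases hk : k < m
  · simp [hk]
  · simp [hk]

-- one row update, seen per particle (the loop-interchange kernel)
theorem pv_rowUpd_map (row : List Int) (m : Nat) (g : Nat → Int × Int) :
    rowUpd row ((List.range m).map g)
      = (List.range m).map (fun (k : Nat) =>
          let x := (PySem.List.pyGet? row (k : Int)).getD 0
          if x ≠ (g k).1 then (x, (g k).2 + 1) else g k) := by
  unfold rowUpd
  rw [pv_enum_map_range, List.map_map]
  rfl

-- full loop interchange: folding the rows over the whole state equals
-- mapping each particle to its own fold over the rows
theorem pv_fold_rows (svs : List (List Int)) (m : Nat) :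
    ∀ (ts : List Int) (g : Nat → Int × Int),
      ts.foldl (fun st t => rowUpd ((PySem.List.pyGet? svs t).getD []) st) ((List.range m).map g)
        = (List.range m).map (fun (k : Nat) => ts.foldl (pvCntStep svs (k : Int)) (g k)) := by
  intro ts
  induction ts with
  | nil => intro g; rfl
  | cons t ts ih =>
    intro g
    simp only [List.foldl_cons]
    rw [pv_rowUpd_map]
    exact ih (fun k => pvCntStep svs (k : Int) (g k) t)

-- the A-side running argmax over range m equals B's max-then-first-index form
theorem pv_argmax (m : Nat) (cN : Nat → Int) (h : ∀ k, 0 ≤ cN k) :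
    (List.range m).foldl
        (fun best k => if cN k > best.2 then ((k : Int), cN k) else best) ((0 : Int), (0 : Int))
      = ((if PySem.List.maxD ((List.range m).map cN) (fun x => x) 0 > 0
          then ((PySem.List.index? ((List.range m).map cN)
                  (PySem.List.maxD ((List.range m).map cN) (fun x => x) 0)).getD 0 : Int)
          else 0),
         PySem.List.maxD ((List.range m).map cN) (fun x => x) 0) := by
  induction m with
  | zero => simp [PySem.List.maxD, PySem.List.max?]
  | succ m ih =>
    rw [List.range_succ, List.foldl_append, List.map_append, ih]
    simp only [List.map_cons, List.map_nil, List.foldl_cons, List.foldl_nil]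
    cases hc : PySem.List.max? ((List.range m).map cN) (fun x => x) with
    | none =>
      -- counts so far is empty, i.e. m = 0
      have hm : (List.range m).map cN = [] := (PySem.List.max?_eq_none_iff _ _).mp hc
      have hm0 : m = 0 := by
        have := congrArg List.length hm
        simpa using this
      subst hm0
      simp only [List.range_zero, List.map_nil, List.nil_append]
      have hmaxD : PySem.List.maxD ([] : List Int) (fun x => x) 0 = 0 := rfl
      have hmaxD1 : PySem.List.maxD [cN 0] (fun x => x) 0 = cN 0 := rfl
      rw [hmaxD, hmaxD1]
      by_cases h0 : cN 0 > 0
      · simp [h0]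
      · have h00 : cN 0 = 0 := le_antisymm (by omega) (h 0)
        simp [h00]
    | some M =>
      have hMD : PySem.List.maxD ((List.range m).map cN) (fun x => x) 0 = M := by
        unfold PySem.List.maxD; rw [hc]; rfl
      have hM0 : 0 ≤ M := by
        obtain ⟨k, _, hk⟩ := List.mem_map.mp (PySem.List.max?_mem hc)
        exact hk ▸ h k
      have hstep : PySem.List.max? ((List.range m).map cN ++ [cN m]) (fun x => x)
          = if M < cN m then some (cN m) else some M := by
        unfold PySem.List.max? at hc ⊢
        rw [List.foldl_append, hc]
        rfl
      rw [hMD]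
      by_cases hgt : cN m > M
      · -- new global maximum at particle m
        have hmax' : PySem.List.maxD ((List.range m).map cN ++ [cN m]) (fun x => x) 0 = cN m := by
          unfold PySem.List.maxD; rw [hstep, if_pos (by omega)]; rfl
        have hnotmem : cN m ∉ (List.range m).map cN := by
          intro hmem
          have := PySem.List.max?_isMax hc _ hmem
          simp only at this
          omega
        rw [hmax']
        rw [if_pos hgt, if_pos (by omega : cN m > 0),
          PySem.List.index?_append_singleton_self _ _ hnotmem]
        simp
      · -- maximum unchanged
        have hmax' : PySem.List.maxD ((List.range m).map cN ++ [cN m]) (fun x => x) 0 = M := by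
          unfold PySem.List.maxD; rw [hstep, if_neg (by omega)]; rfl
        rw [hmax']
        rw [if_neg hgt]
        by_cases hMpos : M > 0
        · rw [if_pos hMpos, if_pos hMpos,
            PySem.List.index?_append_of_mem _ (PySem.List.max?_mem hc)]
        · rw [if_neg hMpos, if_neg hMpos]

theorem pv_main (n : Int) (svs : List (List Int)) (startTime : Int) (endTime : Option Int) :
    findParticleWithMaxSwitches n svs startTime endTime
      = findParticleWithMaxSwitches_alt n svs startTime endTime := by
  set e := endTime.getD (svs.length : Int) with he
  -- A reduced to the running argmax over the per-particle switch counts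
  have hA : findParticleWithMaxSwitches n svs startTime endTime
      = (PySem.List.pyRange 0 n 1).foldl
          (fun best j =>
            if ((pvE svs startTime e j).length : Int) > best.2
            then (j, ((pvE svs startTime e j).length : Int)) else best) (0, 0) := by
    have h1 : findParticleWithMaxSwitches n svs startTime endTime
        = (PySem.Dict.mk (([] : List (Int × List (Int × Int))) ++
            ((PySem.List.pyRange 0 n 1).filter (fun j => !(pvE svs startTime e j).isEmpty)).map
              (fun j => (j, pvE svs startTime e j)))).items.foldl
            (fun acc kv => if (kv.2.length : Int) > acc.2 then (kv.1, (kv.2.length : Int)) else acc)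
            (0, 0) := by
      show ((PySem.List.pyRange 0 n 1).foldl
          (fun d i =>
            ((PySem.List.pyRange startTime e 1).foldl (innerStepA svs i)
              (((PySem.List.pyGet? ((PySem.List.pyGet? svs 0).getD []) i).getD 0), d)).2)
          (PySem.Dict.mk [])).items.foldl
            (fun acc kv => if (kv.2.length : Int) > acc.2 then (kv.1, (kv.2.length : Int)) else acc)
            (0, 0) = _
      rw [pv_outerA svs startTime e (PySem.List.pyRange 0 n 1) []
        (pv_pyRange_nodup 0 n) (fun j _ => rfl)]
    rw [h1, show (PySem.Dict.mk (([] : List (Int × List (Int × Int))) ++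
        ((PySem.List.pyRange 0 n 1).filter (fun j => !(pvE svs startTime e j).isEmpty)).map
          (fun j => (j, pvE svs startTime e j)))).items
        = ((PySem.List.pyRange 0 n 1).filter (fun j => !(pvE svs startTime e j).isEmpty)).map
          (fun j => (j, pvE svs startTime e j)) by simp]
    exact pv_scan_eq svs startTime e (PySem.List.pyRange 0 n 1) (0, 0) le_rfl
  by_cases hn : n ≤ 0
  · -- no particles: both sides are (0, 0)
    have hr : PySem.List.pyRange 0 n 1 = [] := PySem.List.pyRange_one_eq_nil hn
    rw [hA, hr]
    show (0, 0) = findParticleWithMaxSwitches_alt n svs startTime endTime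
    unfold findParticleWithMaxSwitches_alt
    rw [if_pos hn]
  · -- n > 0: interchange B's loops and compare the two argmax forms
    set m := n.toNat with hm
    set cN : Nat → Int := fun k => ((pvE svs startTime e (k : Int)).length : Int) with hcN
    have hrange : PySem.List.pyRange 0 n 1 = (List.range m).map (fun (k : Nat) => (k : Int)) :=
      pv_pyRange_zero n
    -- A side over List.range m
    have hA' : findParticleWithMaxSwitches n svs startTime endTime
        = (List.range m).foldl
            (fun best k => if cN k > best.2 then ((k : Int), cN k) else best) (0, 0) := by
      rw [hA, hrange, List.foldl_map]
    -- B side: unfold, interchange, and identify the counts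
    have hB : findParticleWithMaxSwitches_alt n svs startTime endTime
        = ((if PySem.List.maxD ((List.range m).map cN) (fun x => x) 0 > 0
            then ((PySem.List.index? ((List.range m).map cN)
                    (PySem.List.maxD ((List.range m).map cN) (fun x => x) 0)).getD 0 : Int)
            else 0),
           PySem.List.maxD ((List.range m).map cN) (fun x => x) 0) := by
      unfold findParticleWithMaxSwitches_alt
      rw [if_neg hn]
      simp only [← he]
      rw [hrange, List.map_map]
      rw [pv_fold_rows svs m (PySem.List.pyRange startTime e 1)
        ((fun i => (((PySem.List.pyGet? ((PySem.List.pyGet? svs 0).getD []) i).getD 0), (0 : Int)))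
          ∘ (fun (k : Nat) => (k : Int)))]
      rw [List.map_map]
      have hcounts : ((fun st : Int × Int => st.2) ∘
          fun (k : Nat) => (PySem.List.pyRange startTime e 1).foldl (pvCntStep svs (k : Int))
            ((((fun i => (((PySem.List.pyGet? ((PySem.List.pyGet? svs 0).getD []) i).getD 0), (0 : Int)))
              ∘ (fun (k : Nat) => (k : Int))) k))) = cN := by
        funext k
        show ((PySem.List.pyRange startTime e 1).foldl (pvCntStep svs (k : Int))
          (((PySem.List.pyGet? ((PySem.List.pyGet? svs 0).getD []) (k : Int)).getD 0), (0 : Int))).2 = cN k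
        have := pv_innerB_eq svs (k : Int) (PySem.List.pyRange startTime e 1)
          ((PySem.List.pyGet? ((PySem.List.pyGet? svs 0).getD []) (k : Int)).getD 0) []
        simp only [List.length_nil, Nat.cast_zero] at this
        rw [this]
        rfl
      rw [show (List.map ((fun st : Int × Int => st.2) ∘ _) (List.range m)) = (List.range m).map cN from
        by rw [hcounts]]
    rw [hA', hB]
    exact pv_argmax m cN (fun k => Int.natCast_nonneg _)

-- ===== VERDICT (by name: the statement is the Claim_ definition above) =====
theorem findParticleWithMaxSwitches_spec : Claim_equal_findParticleWithMaxSwitches := by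
  intro n svs startTime endTime _ _
  unfold Spec_findParticleWithMaxSwitches
  exact pv_main n svs startTime endTime
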